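-- pv_equiv track=rewrite | github.com/MrBrantCode/unitest_baseline | mut_generate/mist_train_taco/taco_18654/solution.py | min_replacements_to_v_sequence
-- ===== SOURCE A (Python) =====
-- def min_replacements_to_v_sequence(n, sequence):
--     # Initialize frequency arrays for odd and even indexed elements
--     odd_freq = [[0, i] for i in range(100001)]
--     even_freq = [[0, i] for i in range(100001)]
--
--     # Count frequencies of elements at odd and even indices
--     for i in range(n // 2):
--         odd_freq[sequence[i * 2]][0] += 1
--         even_freq[sequence[i * 2 + 1]][0] += 1
--
--     # Sort the frequency arrays in descending order
--     odd_freq.sort(reverse=True)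
--     even_freq.sort(reverse=True)
--
--     # Initialize the result with a large number
--     res = 10000000000000000
--
--     # Find the minimum replacements needed
--     for i in range(2):
--         for j in range(2):
--             if odd_freq[i][1] != even_freq[j][1]:
--                 res = min(res, n - odd_freq[i][0] - even_freq[j][0])
--
--     return res
-- ===== SOURCE B (Python) =====
-- def min_replacements_to_v_sequence(n, sequence):
--     # Same counting arrays, but no sorting: a single linear scan finds the
--     # top-two (count, index) entries of each parity, then a direct formula
--     # picks the best non-conflicting pair.
--     odd_cnt = [0] * 100001
--     even_cnt = [0] * 100001
--     for i in range(n // 2):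
--         odd_cnt[sequence[2 * i]] += 1
--         even_cnt[sequence[2 * i + 1]] += 1
--
--     def top_two(cnt):
--         c1 = i1 = c2 = i2 = -1
--         for idx, c in enumerate(cnt):
--             if c >= c1:
--                 c2, i2 = c1, i1
--                 c1, i1 = c, idx
--             elif c >= c2:
--                 c2, i2 = c, idx
--         return c1, i1, c2, i2
--
--     co1, io1, co2, io2 = top_two(odd_cnt)
--     ce1, ie1, ce2, ie2 = top_two(even_cnt)
--     if io1 != ie1:
--         return n - co1 - ce1
--     return n - max(co1 + ce2, co2 + ce1)
-- ===== Notes on version B (the rewrite author's own statement) =====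
-- stated objective: faster
-- what changed: A builds two 100001-entry [count,index] pair lists and fully sorts both (descending) just to read off the first two entries; B keeps plain count arrays and finds each parity's top-two (count,index) entries in one linear scan, then picks the best non-conflicting pair with a direct formula instead of A's 2x2 min-loop over the sorted tables.
import Mathlib
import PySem

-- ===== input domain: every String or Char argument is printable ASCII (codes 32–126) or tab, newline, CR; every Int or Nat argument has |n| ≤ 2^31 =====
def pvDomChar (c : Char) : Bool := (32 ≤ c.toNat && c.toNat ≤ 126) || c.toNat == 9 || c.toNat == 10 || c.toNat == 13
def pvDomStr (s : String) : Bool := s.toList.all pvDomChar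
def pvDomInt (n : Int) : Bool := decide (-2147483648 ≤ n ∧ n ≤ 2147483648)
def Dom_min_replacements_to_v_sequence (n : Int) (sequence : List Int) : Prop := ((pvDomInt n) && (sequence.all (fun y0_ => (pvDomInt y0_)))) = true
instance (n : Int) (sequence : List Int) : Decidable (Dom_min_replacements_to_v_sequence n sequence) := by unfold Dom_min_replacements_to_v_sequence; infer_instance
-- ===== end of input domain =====

-- B removes the two 100001-element sorts of A: one linear scan per parity finds the
-- top-two (count, index) entries, and a direct formula picks the best non-conflicting pair.

-- ===== PORT A =====
def pvAInit : List (Int × Int) := (PySem.List.pyRange 0 100001 1).map (fun i => ((0 : Int), i))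

def pvAStep (sequence : List Int) (st : Option (List (Int × Int) × List (Int × Int))) (i : Int) :
    Option (List (Int × Int) × List (Int × Int)) :=
  match st with
  | none => none
  | some (o, e) =>
    match PySem.List.pyGet? sequence (i * 2) with
    | none => none
    | some v =>
      match PySem.List.pyGet? o v with
      | none => none
      | some p =>
        match PySem.List.pySet? o v (p.1 + 1, p.2) with
        | none => none
        | some o' =>
          match PySem.List.pyGet? sequence (i * 2 + 1) with
          | none => none
          | some w =>
            match PySem.List.pyGet? e w with
            | none => none
            | some q =>
              match PySem.List.pySet? e w (q.1 + 1, q.2) with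
              | none => none
              | some e' => some (o', e')

def min_replacements_to_v_sequence (n : Int) (sequence : List Int) : Int :=
  match (PySem.List.pyRange 0 (PySem.Int.floordiv n 2) 1).foldl (pvAStep sequence)
      (some (pvAInit, pvAInit)) with
  | none => 0  -- unreachable under Pre_: the Python raises IndexError exactly here
  | some (o, e) =>
    let os := PySem.List.sorted2 o (fun p => p.1) (fun p => p.2) true
    let es := PySem.List.sorted2 e (fun p => p.1) (fun p => p.2) true
    (PySem.List.pyRange 0 2 1).foldl (fun res i =>
      (PySem.List.pyRange 0 2 1).foldl (fun res j =>
        if (PySem.List.pyGetD os i (0, 0)).2 ≠ (PySem.List.pyGetD es j (0, 0)).2 then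
          min res (n - (PySem.List.pyGetD os i (0, 0)).1 - (PySem.List.pyGetD es j (0, 0)).1)
        else res) res) (10000000000000000 : Int)

-- ===== PORT B =====
def pvBStep (sequence : List Int) (st : Option (List Int × List Int)) (i : Int) :
    Option (List Int × List Int) :=
  match st with
  | none => none
  | some (oc, ec) =>
    match PySem.List.pyGet? sequence (2 * i) with
    | none => none
    | some v =>
      match PySem.List.pyGet? oc v with
      | none => none
      | some c =>
        match PySem.List.pySet? oc v (c + 1) with
        | none => none
        | some oc' =>
          match PySem.List.pyGet? sequence (2 * i + 1) with
          | none => none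
          | some w =>
            match PySem.List.pyGet? ec w with
            | none => none
            | some cw =>
              match PySem.List.pySet? ec w (cw + 1) with
              | none => none
              | some ec' => some (oc', ec')

-- 'for idx, c in enumerate(cnt)' as a fold carrying the running index in the state
def pvTopTwo (cnt : List Int) : (Int × Int) × (Int × Int) :=
  (cnt.foldl (fun q c =>
      (if q.1.1.1 ≤ c then ((c, q.2), q.1.1)
       else if q.1.2.1 ≤ c then (q.1.1, (c, q.2))
       else q.1, q.2 + 1))
    ((((-1 : Int), (-1 : Int)), ((-1 : Int), (-1 : Int))), (0 : Int))).1

def min_replacements_to_v_sequence_alt (n : Int) (sequence : List Int) : Int :=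
  match (PySem.List.pyRange 0 (PySem.Int.floordiv n 2) 1).foldl (pvBStep sequence)
      (some (PySem.List.pyRepeat [(0 : Int)] 100001, PySem.List.pyRepeat [(0 : Int)] 100001)) with
  | none => 0  -- unreachable under Pre_: the Python raises IndexError exactly here
  | some (oc, ec) =>
    let t1 := pvTopTwo oc
    let t2 := pvTopTwo ec
    if t1.1.2 ≠ t2.1.2 then n - t1.1.1 - t2.1.1
    else n - max (t1.1.1 + t2.2.1) (t1.2.1 + t2.1.1)

-- ===== PRECONDITION & SPEC =====
-- Pre_ excludes exactly the inputs where the Python A raises IndexError: a prefix of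
-- length 2*(n//2) must exist in `sequence` (else sequence[i] raises), and every element
-- of that accessed prefix must lie in [-100001, 100000] (else odd_freq[v] raises).
def Pre_min_replacements_to_v_sequence (n : Int) (sequence : List Int) : Prop :=
  2 * PySem.Int.floordiv n 2 ≤ (sequence.length : Int) ∧
  ∀ v ∈ sequence.take (2 * PySem.Int.floordiv n 2).toNat, -100001 ≤ v ∧ v ≤ 100000
instance (n : Int) (sequence : List Int) : Decidable (Pre_min_replacements_to_v_sequence n sequence) := by
  unfold Pre_min_replacements_to_v_sequence; infer_instance

def pvWitness_min_replacements_to_v_sequence : Int × List Int := (4, [1, 2, 1, 3])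

def Spec_min_replacements_to_v_sequence (n : Int) (sequence : List Int) (out : Int) : Prop := out = min_replacements_to_v_sequence_alt n sequence
instance (n : Int) (sequence : List Int) (out : Int) : Decidable (Spec_min_replacements_to_v_sequence n sequence out) := by unfold Spec_min_replacements_to_v_sequence; infer_instance

-- ===== CLAIM (what is proved, stated in full; the proofs are below) =====
def Claim_equal_min_replacements_to_v_sequence : Prop := ∀ (n : Int) (sequence : List Int), Dom_min_replacements_to_v_sequence n sequence → Pre_min_replacements_to_v_sequence n sequence → Spec_min_replacements_to_v_sequence n sequence (min_replacements_to_v_sequence n sequence)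

-- ===== LEMMAS AND PROOFS =====

-- lexicographic order on (count, index) pairs: how Python compares the 2-lists [count, index]
def pvLexLe (p q : Int × Int) : Prop := p.1 < q.1 ∨ (p.1 = q.1 ∧ p.2 ≤ q.2)

theorem pvLexLe_refl (p : Int × Int) : pvLexLe p p := by simp [pvLexLe]

theorem pvLexLe_trans {p q r : Int × Int} (h1 : pvLexLe p q) (h2 : pvLexLe q r) : pvLexLe p r := by
  rcases h1 with h1 | ⟨h1, h1'⟩ <;> rcases h2 with h2 | ⟨h2, h2'⟩ <;> simp [pvLexLe] <;> omega

theorem pvLexLe_antisymm {p q : Int × Int} (h1 : pvLexLe p q) (h2 : pvLexLe q p) : p = q := by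
  rcases p with ⟨a, b⟩; rcases q with ⟨c, d⟩
  rcases h1 with h1 | ⟨h1, h1'⟩ <;> rcases h2 with h2 | ⟨h2, h2'⟩ <;> simp_all <;> omega

-- "a and b are the two lexicographically largest elements of S"
def pvTopSpec (S : List (Int × Int)) (a b : Int × Int) : Prop :=
  a ∈ S ∧ b ∈ S ∧ a ≠ b ∧ pvLexLe b a ∧ (∀ y ∈ S, pvLexLe y a) ∧ (∀ y ∈ S, y ≠ a → pvLexLe y b)

theorem pvTopSpec_unique {S : List (Int × Int)} {a b a' b' : Int × Int}
    (h : pvTopSpec S a b) (h' : pvTopSpec S a' b') : a = a' ∧ b = b' := by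
  obtain ⟨ha, hb, hab, hba, hmax, hsnd⟩ := h
  obtain ⟨ha', hb', hab', hba', hmax', hsnd'⟩ := h'
  have e1 : a = a' := pvLexLe_antisymm (hmax' a ha) (hmax a' ha')
  subst e1
  have e2 : b = b' := pvLexLe_antisymm (hsnd' b hb (Ne.symm hab)) (hsnd b' hb' (Ne.symm hab'))
  exact ⟨rfl, e2⟩

-- relation between A's [count, index] table and B's plain count table
def pvRel (o : List (Int × Int)) (oc : List Int) : Prop :=
  o.length = 100001 ∧ oc.length = 100001 ∧
  ∀ j : Nat, o[j]? = (oc[j]?).map (fun c => (c, (j : Int))) ∧ 0 ≤ (oc[j]?).getD 0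

theorem pvRel_init : pvRel pvAInit (PySem.List.pyRepeat [(0 : Int)] 100001) := by
  rw [PySem.List.pyRepeat_singleton]
  have hto : ((100001 : Int) - 0).toNat = 100001 := by simp
  have hto2 : ((100001 : Int)).toNat = 100001 := by simp
  refine ⟨by rw [pvAInit, List.length_map, PySem.List.length_pyRange_one, hto], by rw [List.length_replicate, hto2], ?_⟩
  intro j
  rw [pvAInit, List.getElem?_map, PySem.List.getElem?_pyRange_one, hto, hto2, List.getElem?_replicate]
  constructor
  · split_ifs with h1 <;> simp
  · split_ifs with h1 <;> simp

theorem pvIdx_lt {v : Int} {k : Nat} (h : PySem.List.pyIdx? 100001 v = some k) : k < 100001 := by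
  unfold PySem.List.pyIdx? at h
  split_ifs at h <;> simp_all <;> omega

theorem pvUpd {o : List (Int × Int)} {oc : List Int} (ho : pvRel o oc) (v : Int) :
    (PySem.List.pyGet? o v = none ∧ PySem.List.pyGet? oc v = none) ∨
    (∃ (c : Int) (k : Nat),
      PySem.List.pyGet? o v = some (c, (k : Int)) ∧
      PySem.List.pyGet? oc v = some c ∧
      PySem.List.pySet? o v (c + 1, (k : Int)) = some (o.set k (c + 1, (k : Int))) ∧
      PySem.List.pySet? oc v (c + 1) = some (oc.set k (c + 1)) ∧
      pvRel (o.set k (c + 1, (k : Int))) (oc.set k (c + 1))) := by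
  obtain ⟨hlo, hloc, hpt⟩ := ho
  unfold PySem.List.pyGet? PySem.List.pySet?
  rw [hlo, hloc]
  rcases hk : PySem.List.pyIdx? 100001 v with _ | k
  · exact Or.inl ⟨rfl, rfl⟩
  · have hklt : k < 100001 := pvIdx_lt hk
    have hkoc : k < oc.length := by omega
    have hc : oc[k]? = some oc[k] := List.getElem?_eq_getElem hkoc
    have h1 := (hpt k).1
    have h2 := (hpt k).2
    rw [hc] at h1 h2
    simp only [Option.getD_some] at h2
    refine Or.inr ⟨oc[k], k, ?_, ?_, rfl, rfl, ?_, ?_, ?_⟩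
    · simp [h1]
    · simp [hc]
    · rw [List.length_set, hlo]
    · rw [List.length_set, hloc]
    · intro j
      rw [List.getElem?_set, List.getElem?_set, hlo, hloc]
      by_cases hkj : k = j
      · subst hkj
        constructor
        · simp [hklt]
        · simp [hklt]; omega
      · simpa [hkj] using hpt j

-- the entry list both sides effectively work over
def pvEntries (cnt : List Int) : List (Int × Int) :=
  (PySem.List.pyRange 0 100001 1).map (fun j => (PySem.List.pyGetD cnt j (-1), j))

theorem pvEntries_length (cnt : List Int) : (pvEntries cnt).length = 100001 := by
  simp [pvEntries, PySem.List.length_pyRange_one]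

theorem pvEntries_eq {o : List (Int × Int)} {oc : List Int} (h : pvRel o oc) : o = pvEntries oc := by
  obtain ⟨hlo, hloc, hpt⟩ := h
  apply List.ext_getElem?
  intro j
  rw [(hpt j).1]
  simp only [pvEntries, List.getElem?_map, PySem.List.getElem?_pyRange_one]
  by_cases hj : j < 100001
  · have hj' : j < oc.length := by omega
    have hc : oc[j]? = some oc[j] := List.getElem?_eq_getElem hj'
    rw [hc]
    have hg : PySem.List.pyGetD oc ((j : Nat) : Int) (-1) = oc[j] := by
      rw [PySem.List.pyGetD_of_nonneg oc (-1) (by positivity)]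
      simp [List.getD_eq_getElem?_getD, hc]
    have hto : ((100001 : Int) - 0).toNat = 100001 := by simp
    rw [hto]
    simp [hj, hg]
  · have h0 : oc[j]? = none := List.getElem?_eq_none_iff.mpr (by omega)
    have hto : ((100001 : Int) - 0).toNat = 100001 := by simp
    rw [hto, h0]
    simp [hj]

theorem pvEntries_snd_lt (cnt : List Int) : (pvEntries cnt).Pairwise (fun p q => p.2 < q.2) := by
  simp only [pvEntries, List.pairwise_map]
  exact PySem.List.pairwise_lt_pyRange_one 0 100001

theorem pvEntries_fst_nonneg {o : List (Int × Int)} {oc : List Int} (h : pvRel o oc) :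
    ∀ p ∈ pvEntries oc, 0 ≤ p.1 := by
  obtain ⟨hlo, hloc, hpt⟩ := h
  intro p hp
  simp only [pvEntries, List.mem_map] at hp
  obtain ⟨j, hj, rfl⟩ := hp
  rw [PySem.List.mem_pyRange_one] at hj
  rw [PySem.List.pyGetD_of_nonneg oc (-1) hj.1]
  have h2 := (hpt j.toNat).2
  have hlt : j.toNat < oc.length := by omega
  have hc : oc[j.toNat]? = some oc[j.toNat] := List.getElem?_eq_getElem hlt
  rw [hc] at h2
  simpa [List.getD_eq_getElem?_getD, hc] using h2

theorem pvEntries_snd_nonneg (cnt : List Int) : ∀ p ∈ pvEntries cnt, 0 ≤ p.2 := by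
  intro p hp
  simp only [pvEntries, List.mem_map] at hp
  obtain ⟨j, hj, rfl⟩ := hp
  rw [PySem.List.mem_pyRange_one] at hj
  exact hj.1

def pvG (st : (Int × Int) × (Int × Int)) (p : Int × Int) : (Int × Int) × (Int × Int) :=
  if st.1.1 ≤ p.1 then (p, st.1) else if st.2.1 ≤ p.1 then (st.1, p) else st

theorem pvEnum_entries {oc : List Int} (hlen : oc.length = 100001) :
    (PySem.List.enumerate oc 0).map (fun p => (p.2, p.1)) = pvEntries oc := by
  apply List.ext_getElem?
  intro k
  rw [List.getElem?_map, PySem.List.getElem?_enumerate]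
  simp only [pvEntries, List.getElem?_map, PySem.List.getElem?_pyRange_one]
  by_cases hk : k < 100001
  · have hk' : k < oc.length := by omega
    have hc : oc[k]? = some oc[k] := List.getElem?_eq_getElem hk'
    rw [hc]
    have hto : ((100001 : Int) - 0).toNat = 100001 := by simp
    rw [hto]
    have hg : PySem.List.pyGetD oc ((k : Nat) : Int) (-1) = oc[k] := by
      rw [PySem.List.pyGetD_of_nonneg oc (-1) (by positivity)]
      simp [List.getD_eq_getElem?_getD, hc]
    simp [hk, hg]
  · have h0 : oc[k]? = none := List.getElem?_eq_none_iff.mpr (by omega)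
    have hto : ((100001 : Int) - 0).toNat = 100001 := by simp
    rw [hto, h0]
    simp [hk]

theorem pvScan_shift (cnt : List Int) : ∀ (st : (Int × Int) × (Int × Int)) (s : Int),
    (cnt.foldl (fun q c =>
      (if q.1.1.1 ≤ c then ((c, q.2), q.1.1)
       else if q.1.2.1 ≤ c then (q.1.1, (c, q.2))
       else q.1, q.2 + 1)) (st, s)).1
    = ((PySem.List.enumerate cnt s).map (fun p => (p.2, p.1))).foldl pvG st := by
  induction cnt with
  | nil => intro st s; simp [PySem.List.enumerate_nil]
  | cons c t ih =>
    intro st s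
    rw [List.foldl_cons, PySem.List.enumerate_cons, List.map_cons, List.foldl_cons]
    simpa [pvG] using ih (pvG st (c, s)) (s + 1)

theorem pvTopTwo_eq {o : List (Int × Int)} {oc : List Int} (h : pvRel o oc) :
    pvTopTwo oc = (pvEntries oc).foldl pvG (((-1 : Int), (-1 : Int)), ((-1 : Int), (-1 : Int))) := by
  rw [pvTopTwo, pvScan_shift, pvEnum_entries h.2.1]

theorem pvLexLe_mk {p q : Int × Int} (h : p.1 < q.1 ∨ (p.1 ≤ q.1 ∧ p.2 ≤ q.2)) : pvLexLe p q := by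
  unfold pvLexLe; omega

def pvInv (E : List (Int × Int)) (st r : (Int × Int) × (Int × Int)) : Prop :=
  pvLexLe r.2 r.1 ∧
  (r.1 = st.1 ∨ r.1 ∈ E) ∧
  (r.2 = st.1 ∨ r.2 = st.2 ∨ r.2 ∈ E) ∧
  pvLexLe st.1 r.1 ∧
  (∀ p ∈ E, pvLexLe p r.1) ∧
  (st.1 ≠ r.1 → pvLexLe st.1 r.2) ∧
  (st.2 ≠ r.1 → pvLexLe st.2 r.2) ∧
  (∀ p ∈ E, p ≠ r.1 → pvLexLe p r.2) ∧
  (r.1 ≠ r.2 ∨ r = st)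

theorem pvScan_aux : ∀ (E : List (Int × Int)) (st : (Int × Int) × (Int × Int)),
    E.Pairwise (fun p q => p.2 < q.2) →
    pvLexLe st.2 st.1 →
    (∀ p ∈ E, st.1.2 < p.2 ∧ st.2.2 < p.2) →
    (st.1 ≠ st.2 ∨ ∀ p ∈ E, st.2.1 ≤ p.1) →
    pvInv E st (E.foldl pvG st) := by
  intro E
  induction E with
  | nil =>
    intro st _ h1 _ _
    exact ⟨h1, Or.inl rfl, Or.inr (Or.inl rfl), pvLexLe_refl _, by simp,
      fun h => absurd rfl h, fun _ => pvLexLe_refl _, by simp, Or.inr rfl⟩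
  | cons x E' ih =>
    intro st hE h1 h2 h3
    rw [List.pairwise_cons] at hE
    obtain ⟨hx, hE'⟩ := hE
    obtain ⟨h2x1, h2x2⟩ := h2 x List.mem_cons_self
    have h2' : ∀ p ∈ E', st.1.2 < p.2 ∧ st.2.2 < p.2 := fun p hp => h2 p (List.mem_cons_of_mem x hp)
    rw [List.foldl_cons]
    by_cases hc1 : st.1.1 ≤ x.1
    · have hst' : pvG st x = (x, st.1) := by simp [pvG, hc1]
      rw [hst']
      have h1' : pvLexLe st.1 x := pvLexLe_mk (by omega)
      have IH := ih (x, st.1) hE' h1'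
        (fun p hp => ⟨hx p hp, (h2' p hp).1⟩)
        (Or.inl (by intro hcon; have := congrArg Prod.snd hcon; simp at this; omega))
      obtain ⟨i1, i2, i3, i4, i5, i6, i7, i8, i9⟩ := IH
      set r := E'.foldl pvG (x, st.1) with hr
      have hst1_ne_r1 : st.1 ≠ r.1 := by
        intro hcon
        rcases i2 with he | he
        · have := congrArg Prod.snd (hcon.trans he); simp at this; omega
        · have := (h2' r.1 he).1; rw [hcon] at this; omega
      refine ⟨i1, ?_, ?_, pvLexLe_trans h1' i4, ?_, ?_, ?_, ?_, ?_⟩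
      · rcases i2 with he | he
        · exact Or.inr (he ▸ List.mem_cons_self)
        · exact Or.inr (List.mem_cons_of_mem x he)
      · rcases i3 with he | he | he
        · exact Or.inr (Or.inr (he ▸ List.mem_cons_self))
        · exact Or.inl he
        · exact Or.inr (Or.inr (List.mem_cons_of_mem x he))
      · intro p hp
        rcases List.mem_cons.mp hp with rfl | hp'
        · exact i4
        · exact i5 p hp'
      · intro _; exact i7 hst1_ne_r1
      · intro _
        exact pvLexLe_trans h1 (i7 hst1_ne_r1)
      · intro p hp hpr
        rcases List.mem_cons.mp hp with rfl | hp'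
        · exact i6 hpr
        · exact i8 p hp' hpr
      · rcases i9 with he | he
        · exact Or.inl he
        · left; rw [he]
          intro hcon; have := congrArg Prod.snd hcon; simp at this; omega
    · by_cases hc2 : st.2.1 ≤ x.1
      · have hst' : pvG st x = (st.1, x) := by simp [pvG, hc1, hc2]
        rw [hst']
        have hxlt : x.1 < st.1.1 := by omega
        have h1' : pvLexLe x st.1 := Or.inl hxlt
        have hne : st.1 ≠ x := by
          intro hcon; rw [hcon] at hxlt; omega
        have IH := ih (st.1, x) hE' h1'
          (fun p hp => ⟨(h2' p hp).1, hx p hp⟩)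
          (Or.inl hne)
        obtain ⟨i1, i2, i3, i4, i5, i6, i7, i8, i9⟩ := IH
        set r := E'.foldl pvG (st.1, x) with hr
        have hx2 : pvLexLe st.2 x := pvLexLe_mk (by omega)
        have hst2r2 : pvLexLe st.2 r.2 := by
          by_cases hxr : x = r.1
          · have : st.1 ≠ r.1 := by rw [← hxr]; exact hne
            exact pvLexLe_trans h1 (i6 this)
          · exact pvLexLe_trans hx2 (i7 hxr)
        refine ⟨i1, ?_, ?_, i4, ?_, i6, fun _ => hst2r2, ?_, ?_⟩
        · rcases i2 with he | he
          · exact Or.inl he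
          · exact Or.inr (List.mem_cons_of_mem x he)
        · rcases i3 with he | he | he
          · exact Or.inl he
          · exact Or.inr (Or.inr (he ▸ List.mem_cons_self))
          · exact Or.inr (Or.inr (List.mem_cons_of_mem x he))
        · intro p hp
          rcases List.mem_cons.mp hp with rfl | hp'
          · by_cases hxr : p = r.1
            · rw [hxr]; exact pvLexLe_refl _
            · exact pvLexLe_trans (i7 hxr) i1
          · exact i5 p hp'
        · intro p hp hpr
          rcases List.mem_cons.mp hp with rfl | hp'
          · exact i7 hpr
          · exact i8 p hp' hpr
        · rcases i9 with he | he
          · exact Or.inl he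
          · left; rw [he]; exact hne
      · have hst' : pvG st x = st := by simp [pvG, hc1, hc2]
        rw [hst']
        have hne : st.1 ≠ st.2 := by
          rcases h3 with h | h
          · exact h
          · exact absurd (h x List.mem_cons_self) hc2
        have IH := ih st hE' h1 h2' (Or.inl hne)
        obtain ⟨i1, i2, i3, i4, i5, i6, i7, i8, i9⟩ := IH
        set r := E'.foldl pvG st with hr
        have hst2_ne_r1 : st.2 ≠ r.1 := by
          intro hcon
          have : st.1 = st.2 := pvLexLe_antisymm (hcon ▸ i4) h1
          exact hne this
        have hxle : pvLexLe x st.2 := Or.inl (by omega)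
        have hxr2 : pvLexLe x r.2 := pvLexLe_trans hxle (i7 hst2_ne_r1)
        refine ⟨i1, ?_, ?_, i4, ?_, i6, i7, ?_, i9⟩
        · rcases i2 with he | he
          · exact Or.inl he
          · exact Or.inr (List.mem_cons_of_mem x he)
        · rcases i3 with he | he | he
          · exact Or.inl he
          · exact Or.inr (Or.inl he)
          · exact Or.inr (Or.inr (List.mem_cons_of_mem x he))
        · intro p hp
          rcases List.mem_cons.mp hp with rfl | hp'
          · exact pvLexLe_trans hxr2 i1
          · exact i5 p hp'
        · intro p hp hpr
          rcases List.mem_cons.mp hp with rfl | hp'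
          · exact hxr2
          · exact i8 p hp' hpr

-- B's scan computes the top two entries
set_option maxRecDepth 100000 in
theorem pvTopTwo_spec {o : List (Int × Int)} {oc : List Int} (h : pvRel o oc) :
    pvTopSpec (pvEntries oc) (pvTopTwo oc).1 (pvTopTwo oc).2 := by
  have hfst := pvEntries_fst_nonneg h
  have hsnd := pvEntries_snd_nonneg oc
  have hlen := pvEntries_length oc
  have hpw := pvEntries_snd_lt oc
  rw [pvTopTwo_eq h]
  have H := pvScan_aux (pvEntries oc) (((-1 : Int), (-1 : Int)), ((-1 : Int), (-1 : Int)))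
    hpw (pvLexLe_refl _)
    (fun p hp => by have := hsnd p hp; constructor <;> · simp; omega)
    (Or.inr (fun p hp => by have := hfst p hp; simp; omega))
  obtain ⟨i1, i2, i3, i4, i5, i6, i7, i8, i9⟩ := H
  set r := (pvEntries oc).foldl pvG (((-1 : Int), (-1 : Int)), ((-1 : Int), (-1 : Int))) with hr
  obtain ⟨p1, E1, hE1⟩ : ∃ p1 E1, pvEntries oc = p1 :: E1 := by
    cases hE : pvEntries oc with
    | nil => rw [hE] at hlen; simp only [List.length_nil] at hlen; omega
    | cons a t => exact ⟨a, t, rfl⟩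
  obtain ⟨p2, E2, hE2⟩ : ∃ p2 E2, E1 = p2 :: E2 := by
    cases hE : E1 with
    | nil => rw [hE1, hE] at hlen; simp only [List.length_cons, List.length_nil] at hlen; omega
    | cons a t => exact ⟨a, t, rfl⟩
  have hm1 : p1 ∈ pvEntries oc := by rw [hE1]; exact List.mem_cons_self
  have hm2 : p2 ∈ pvEntries oc := by rw [hE1, hE2]; exact List.mem_cons_of_mem _ List.mem_cons_self
  have hp12 : p1 ≠ p2 := by
    rw [hE1, hE2] at hpw
    rw [List.pairwise_cons] at hpw
    have := hpw.1 p2 List.mem_cons_self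
    intro hcon; rw [hcon] at this; omega
  have hr1mem : r.1 ∈ pvEntries oc := by
    rcases i2 with he | he
    · exfalso
      have := i5 p1 hm1
      have hf := hfst p1 hm1
      rw [he] at this
      unfold pvLexLe at this; simp at this; omega
    · exact he
  have hr1fst : 0 ≤ r.1.1 := hfst r.1 hr1mem
  have hr2mem : r.2 ∈ pvEntries oc := by
    rcases i3 with he | he | he
    · exfalso
      obtain ⟨q, hq, hqr⟩ : ∃ q, q ∈ pvEntries oc ∧ q ≠ r.1 := by
        by_cases h12 : p1 = r.1
        · exact ⟨p2, hm2, by rw [← h12]; exact Ne.symm hp12⟩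
        · exact ⟨p1, hm1, h12⟩
      have := i8 q hq hqr
      have hf := hfst q hq
      rw [he] at this
      unfold pvLexLe at this; simp at this; omega
    · exfalso
      obtain ⟨q, hq, hqr⟩ : ∃ q, q ∈ pvEntries oc ∧ q ≠ r.1 := by
        by_cases h12 : p1 = r.1
        · exact ⟨p2, hm2, by rw [← h12]; exact Ne.symm hp12⟩
        · exact ⟨p1, hm1, h12⟩
      have := i8 q hq hqr
      have hf := hfst q hq
      rw [he] at this
      unfold pvLexLe at this; simp at this; omega
    · exact he
  have hr12 : r.1 ≠ r.2 := by
    rcases i9 with he | he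
    · exact he
    · exfalso
      have heq : r.1 = ((-1 : Int), (-1 : Int)) := by rw [he]
      rw [heq] at hr1fst
      have hx : (0 : Int) ≤ -1 := hr1fst
      omega
  exact ⟨hr1mem, hr2mem, hr12, i1, i5, i8⟩

def pvBef (x y : Int × Int) : Bool :=
  decide (y.1 < x.1) || (!decide (x.1 < y.1) && decide (y.2 < x.2))

theorem pvSorted2_eq (o : List (Int × Int)) :
    PySem.List.sorted2 o (fun p => p.1) (fun p => p.2) true =
      o.foldl (fun acc x => PySem.List.insertBy pvBef x acc) [] := rfl

theorem pvBef_le_of_true {x y : Int × Int} (h : pvBef x y = true) : pvLexLe y x := by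
  simp [pvBef] at h
  unfold pvLexLe
  omega

theorem pvBef_ge_of_false {x y : Int × Int} (h : pvBef x y = false) : pvLexLe x y := by
  simp [pvBef] at h
  unfold pvLexLe
  omega

theorem pvInsert_pairwise {x : Int × Int} : ∀ {l : List (Int × Int)},
    l.Pairwise (fun p q => pvLexLe q p) →
    (PySem.List.insertBy pvBef x l).Pairwise (fun p q => pvLexLe q p) := by
  intro l
  induction l with
  | nil => intro _; simp [PySem.List.insertBy]
  | cons y ys ih =>
    intro h
    rw [List.pairwise_cons] at h
    obtain ⟨hy, hys⟩ := h
    show (if pvBef x y then x :: y :: ys else y :: PySem.List.insertBy pvBef x ys).Pairwise _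
    by_cases hb : pvBef x y
    · rw [if_pos hb]
      have hxy := pvBef_le_of_true hb
      rw [List.pairwise_cons]
      refine ⟨?_, List.pairwise_cons.mpr ⟨hy, hys⟩⟩
      intro z hz
      rcases List.mem_cons.mp hz with rfl | hz'
      · exact hxy
      · exact pvLexLe_trans (hy z hz') hxy
    · rw [if_neg hb]
      have hyx := pvBef_ge_of_false (by simpa using hb)
      rw [List.pairwise_cons]
      refine ⟨?_, ih hys⟩
      intro z hz
      rcases (PySem.List.mem_insertBy _ _ _ _).mp hz with rfl | hz'
      · exact hyx
      · exact hy z hz'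

theorem pvSortFold_pairwise : ∀ (o acc : List (Int × Int)),
    acc.Pairwise (fun p q => pvLexLe q p) →
    (o.foldl (fun acc x => PySem.List.insertBy pvBef x acc) acc).Pairwise (fun p q => pvLexLe q p) := by
  intro o
  induction o with
  | nil => intro acc h; exact h
  | cons x xs ih => intro acc h; exact ih _ (pvInsert_pairwise h)

theorem pvSnd_ne {S : List (Int × Int)} (hp : S.Pairwise (fun p q => p.2 < q.2))
    {x y : Int × Int} (hx : x ∈ S) (hy : y ∈ S) (hxy : x ≠ y) : x.2 ≠ y.2 := by
  have hne : S.Pairwise (fun p q => p.2 ≠ q.2) := hp.imp (fun h => by omega)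
  have := List.Pairwise.forall (fun p q h => h.symm : Symmetric (fun p q : Int × Int => p.2 ≠ q.2)) hne hx hy hxy
  exact this

-- A's sort puts the top two entries first
theorem pvSorted_spec {o : List (Int × Int)} {oc : List Int} (h : pvRel o oc) :
    ∃ a b t, PySem.List.sorted2 o (fun p => p.1) (fun p => p.2) true = a :: b :: t ∧
      pvTopSpec (pvEntries oc) a b := by
  have oEq : o = pvEntries oc := pvEntries_eq h
  have hperm : (PySem.List.sorted2 o (fun p => p.1) (fun p => p.2) true).Perm o :=
    PySem.List.sorted2_perm o _ _ true
  have hpws : (PySem.List.sorted2 o (fun p => p.1) (fun p => p.2) true).Pairwise (fun p q => pvLexLe q p) := by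
    rw [pvSorted2_eq]
    exact pvSortFold_pairwise o [] (by simp)
  have hlen : (PySem.List.sorted2 o (fun p => p.1) (fun p => p.2) true).length = 100001 := by
    rw [hperm.length_eq, oEq]
    exact pvEntries_length oc
  have hnd_o : o.Nodup := by
    rw [oEq]
    refine List.Pairwise.imp ?_ (pvEntries_snd_lt oc)
    intro a b hlt hcon
    rw [hcon] at hlt
    omega
  have hnd : (PySem.List.sorted2 o (fun p => p.1) (fun p => p.2) true).Nodup :=
    hperm.nodup_iff.mpr hnd_o
  obtain ⟨a, l1, hs1⟩ : ∃ a l1, PySem.List.sorted2 o (fun p => p.1) (fun p => p.2) true = a :: l1 := by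
    cases hE : PySem.List.sorted2 o (fun p => p.1) (fun p => p.2) true with
    | nil => rw [hE] at hlen; simp only [List.length_nil] at hlen; omega
    | cons a t => exact ⟨a, t, rfl⟩
  obtain ⟨b, t, hs2⟩ : ∃ b t, l1 = b :: t := by
    cases hE : l1 with
    | nil => rw [hs1, hE] at hlen; simp only [List.length_cons, List.length_nil] at hlen; omega
    | cons b t => exact ⟨b, t, rfl⟩
  rw [hs2] at hs1
  rw [hs1] at hperm hpws hnd
  rw [List.pairwise_cons] at hpws
  obtain ⟨hpa, hpws'⟩ := hpws
  rw [List.pairwise_cons] at hpws'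
  obtain ⟨hpb, _⟩ := hpws'
  rw [List.nodup_cons] at hnd
  have hab : a ≠ b := by
    intro hcon
    exact hnd.1 (hcon ▸ List.mem_cons_self)
  refine ⟨a, b, t, hs1, ?_, ?_, hab, hpa b List.mem_cons_self, ?_, ?_⟩
  · rw [← oEq]
    exact hperm.mem_iff.mp List.mem_cons_self
  · rw [← oEq]
    exact hperm.mem_iff.mp (List.mem_cons_of_mem a List.mem_cons_self)
  · intro y hy
    rw [← oEq] at hy
    have : y ∈ a :: b :: t := hperm.mem_iff.mpr hy
    rcases List.mem_cons.mp this with rfl | h'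
    · exact pvLexLe_refl _
    · exact hpa y h'
  · intro y hy hya
    rw [← oEq] at hy
    have : y ∈ a :: b :: t := hperm.mem_iff.mpr hy
    rcases List.mem_cons.mp this with rfl | h'
    · exact absurd rfl hya
    · rcases List.mem_cons.mp h' with rfl | h''
      · exact pvLexLe_refl _
      · exact hpb y h'' 

-- the final arithmetic: A's 2x2 min-loop equals B's branch formula
theorem pvFinal_eq (n : Int) (hn : n ≤ 2147483648)
    (ao bo ae be : Int × Int) (t1 t2 : List (Int × Int))
    (h1 : 0 ≤ ao.1) (h2 : 0 ≤ ae.1) (h3 : bo.1 ≤ ao.1) (h4 : be.1 ≤ ae.1)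
    (h5 : 0 ≤ bo.1) (h6 : 0 ≤ be.1)
    (ho : ao.2 ≠ bo.2) (he : ae.2 ≠ be.2) :
    ((PySem.List.pyRange 0 2 1).foldl (fun res i =>
      (PySem.List.pyRange 0 2 1).foldl (fun res j =>
        if (PySem.List.pyGetD (ao :: bo :: t1) i (0, 0)).2 ≠ (PySem.List.pyGetD (ae :: be :: t2) j (0, 0)).2 then
          min res (n - (PySem.List.pyGetD (ao :: bo :: t1) i (0, 0)).1 - (PySem.List.pyGetD (ae :: be :: t2) j (0, 0)).1)
        else res) res) (10000000000000000 : Int)) =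
    (if ao.2 ≠ ae.2 then n - ao.1 - ae.1 else n - max (ao.1 + be.1) (bo.1 + ae.1)) := by
  have hrange : PySem.List.pyRange 0 2 1 = [0, 1] := by decide
  have g0 : ∀ (l : List (Int × Int)) (a b : Int × Int), PySem.List.pyGetD (a :: b :: l) 0 (0, 0) = a := by
    intro l a b
    rw [PySem.List.pyGetD_of_nonneg _ _ (by norm_num)]
    rfl
  have g1 : ∀ (l : List (Int × Int)) (a b : Int × Int), PySem.List.pyGetD (a :: b :: l) 1 (0, 0) = b := by
    intro l a b
    rw [PySem.List.pyGetD_of_nonneg _ _ (by norm_num)]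
    rfl
  rw [hrange]
  simp only [List.foldl_cons, List.foldl_nil, g0, g1]
  split_ifs <;> omega

-- under Pre_, neither Python raises: both loops return a table pair (and they stay related)
theorem pvSeqGet_some {seq : List Int} {idx : Int} (h0 : 0 ≤ idx) (h1 : idx < (seq.length : Int)) :
    PySem.List.pyGet? seq idx = seq[idx.toNat]? := by
  unfold PySem.List.pyGet? PySem.List.pyIdx?
  rw [if_pos h0, if_pos (by omega)]
  rfl

theorem pvMem_take {seq : List Int} {k T : Nat} (hk : k < T) (hlen : k < seq.length) :
    seq[k] ∈ seq.take T := by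
  have hkt : k < (seq.take T).length := by
    rw [List.length_take]
    omega
  have : (seq.take T)[k] = seq[k] := List.getElem_take
  rw [← this]
  exact List.getElem_mem hkt

theorem pvTableGet_ne_none {o : List (Int × Int)} (hlen : o.length = 100001) {v : Int}
    (hb1 : -100001 ≤ v) (hb2 : v ≤ 100000) : PySem.List.pyGet? o v ≠ none := by
  unfold PySem.List.pyGet? PySem.List.pyIdx?
  rw [hlen]
  split_ifs with c1 c2 c3
  · simp only [Option.bind_some]
    have : v.toNat < o.length := by omega
    simp [List.getElem?_eq_getElem this]
  · omega
  · simp only [Option.bind_some]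
    have : 100001 - (-v).toNat < o.length := by omega
    simp [List.getElem?_eq_getElem this]
  · omega

theorem pvFold_some (seq : List Int) (T : Nat)
    (hvals : ∀ v ∈ seq.take T, -100001 ≤ v ∧ v ≤ 100000) :
    ∀ (l : List Int) (o e : List (Int × Int)) (oc ec : List Int),
    (∀ i ∈ l, 0 ≤ i ∧ 2 * i + 1 < (T : Int) ∧ (T : Int) ≤ (seq.length : Int)) →
    pvRel o oc → pvRel e ec →
    ∃ o' e' oc' ec',
      l.foldl (pvAStep seq) (some (o, e)) = some (o', e') ∧
      l.foldl (pvBStep seq) (some (oc, ec)) = some (oc', ec') ∧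
      pvRel o' oc' ∧ pvRel e' ec' := by
  intro l
  induction l with
  | nil =>
    intro o e oc ec _ ho he
    exact ⟨o, e, oc, ec, rfl, rfl, ho, he⟩
  | cons i l ih =>
    intro o e oc ec hvalid ho he
    obtain ⟨hi0, hi1, hTlen⟩ := hvalid i List.mem_cons_self
    -- first access: sequence[i*2]
    have hv0 : 0 ≤ i * 2 := by omega
    have hv1 : i * 2 < (seq.length : Int) := by omega
    have hvget : PySem.List.pyGet? seq (i * 2) = seq[(i * 2).toNat]? := pvSeqGet_some hv0 hv1
    have hvlt : (i * 2).toNat < seq.length := by omega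
    have hvsome : PySem.List.pyGet? seq (i * 2) = some (seq[(i * 2).toNat]) := by
      rw [hvget]
      exact List.getElem?_eq_getElem hvlt
    have hvmem : seq[(i * 2).toNat] ∈ seq.take T := pvMem_take (by omega) hvlt
    obtain ⟨hvb1, hvb2⟩ := hvals _ hvmem
    -- second access: sequence[i*2+1]
    have hw0 : 0 ≤ i * 2 + 1 := by omega
    have hw1 : i * 2 + 1 < (seq.length : Int) := by omega
    have hwlt : (i * 2 + 1).toNat < seq.length := by omega
    have hwsome : PySem.List.pyGet? seq (i * 2 + 1) = some (seq[(i * 2 + 1).toNat]) := by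
      rw [pvSeqGet_some hw0 hw1]
      exact List.getElem?_eq_getElem hwlt
    have hwmem : seq[(i * 2 + 1).toNat] ∈ seq.take T := pvMem_take (by omega) hwlt
    obtain ⟨hwb1, hwb2⟩ := hvals _ hwmem
    -- table updates cannot fail
    rcases pvUpd ho (seq[(i * 2).toNat]) with ⟨hnone, _⟩ | ⟨c, k, g1, g2, g3, g4, g5⟩
    · exact absurd hnone (pvTableGet_ne_none ho.1 hvb1 hvb2)
    rcases pvUpd he (seq[(i * 2 + 1).toNat]) with ⟨hnone, _⟩ | ⟨d, m, f1, f2, f3, f4, f5⟩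
    · exact absurd hnone (pvTableGet_ne_none he.1 hwb1 hwb2)
    have hA : pvAStep seq (some (o, e)) i =
        some (o.set k (c + 1, (k : Int)), e.set m (d + 1, (m : Int))) := by
      unfold pvAStep
      rw [hvsome]
      simp only [g1, g3, hwsome, f1, f3]
    have hB : pvBStep seq (some (oc, ec)) i =
        some (oc.set k (c + 1), ec.set m (d + 1)) := by
      unfold pvBStep
      rw [mul_comm 2 i, hvsome]
      simp only [g2, g4, hwsome, f2, f4]
    rw [List.foldl_cons, List.foldl_cons, hA, hB]
    exact ih _ _ _ _ (fun j hj => hvalid j (List.mem_cons_of_mem i hj)) g5 f5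

-- ===== VERDICT (by name: the statement is the Claim_ definition above) =====
theorem min_replacements_to_v_sequence_spec : Claim_equal_min_replacements_to_v_sequence := by
  unfold Claim_equal_min_replacements_to_v_sequence
  intro n seq hdom hpre
  unfold Spec_min_replacements_to_v_sequence
  obtain ⟨hpre1, hpre2⟩ := hpre
  have hn : n ≤ 2147483648 := by
    unfold Dom_min_replacements_to_v_sequence pvDomInt at hdom
    rw [Bool.and_eq_true] at hdom
    have := of_decide_eq_true hdom.1
    omega
  set T : Nat := (2 * PySem.Int.floordiv n 2).toNat with hT
  have hfold := pvFold_some seq T hpre2 (PySem.List.pyRange 0 (PySem.Int.floordiv n 2) 1)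
    pvAInit pvAInit (PySem.List.pyRepeat [(0 : Int)] 100001) (PySem.List.pyRepeat [(0 : Int)] 100001)
    (by
      intro i hi
      rw [PySem.List.mem_pyRange_one] at hi
      have hq : 0 < PySem.Int.floordiv n 2 := by omega
      have hTc : (T : Int) = 2 * PySem.Int.floordiv n 2 := by
        rw [hT]
        exact Int.toNat_of_nonneg (by omega)
      refine ⟨hi.1, by omega, by omega⟩)
    pvRel_init pvRel_init
  obtain ⟨o, e, oc, ec, hA, hB, ho, he⟩ := hfold
  unfold min_replacements_to_v_sequence min_replacements_to_v_sequence_alt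
  rw [hA, hB]
  obtain ⟨ao, bo, t1, hs1, hspec1⟩ := pvSorted_spec ho
  obtain ⟨ae, be, t2, hs2, hspec2⟩ := pvSorted_spec he
  have hu1 := pvTopSpec_unique (pvTopTwo_spec ho) hspec1
  have hu2 := pvTopSpec_unique (pvTopTwo_spec he) hspec2
  simp only [hs1, hs2, hu1.1, hu1.2, hu2.1, hu2.2]
  have hno := pvEntries_fst_nonneg ho
  have hne := pvEntries_fst_nonneg he
  have hsndo : ao.2 ≠ bo.2 :=
    pvSnd_ne (pvEntries_snd_lt oc) hspec1.1 hspec1.2.1 hspec1.2.2.1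
  have hsnde : ae.2 ≠ be.2 :=
    pvSnd_ne (pvEntries_snd_lt ec) hspec2.1 hspec2.2.1 hspec2.2.2.1
  have hlexo := hspec1.2.2.2.1
  have hlexe := hspec2.2.2.2.1
  unfold pvLexLe at hlexo hlexe
  rw [pvFinal_eq n hn ao bo ae be t1 t2
    (hno ao hspec1.1) (hne ae hspec2.1) (by omega) (by omega)
    (hno bo hspec1.2.1) (hne be hspec2.2.1) hsndo hsnde]
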